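-- pv_equiv track=rewrite | github.com/wyf162/pythonProject | leetcode/dynamic-programming/state-compress/2305_distribute_cookies.py | distributeCookies2
-- ===== SOURCE A (Python) =====
-- from typing import List
--
-- def distributeCookies2(cookies: List[int], k: int) -> int:
--     n = len(cookies)
--     m = 1 << n
--     ss = [0] * (1 << n)
--     for i, v in enumerate(cookies):
--         bit = 1 << i
--         for j in range(bit):
--             ss[bit | j] = ss[j] + v
--
--     f = ss.copy()
--     for _ in range(1, k):
--         for j in range(m - 1, 0, -1):
--             s = j
--             while s:
--                 v = f[j ^ s]
--                 if ss[s] > v: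
--                     v = ss[s]
--                 if v < f[j]:
--                     f[j] = v
--                 s = (s - 1) & j
--     return f[-1]
-- ===== SOURCE B (Python) =====
-- def distributeCookies2(cookies, k):
--     if not cookies:
--         return 0
--     n = len(cookies)
--
--     def subsum(mask):
--         s = 0
--         i = 0
--         while mask:
--             if mask & 1:
--                 s += cookies[i]
--             mask >>= 1
--             i += 1
--         return s
--
--     memo = {}
--
--     def best(mask, t):
--         # min over partitions of the nonempty mask into at most t nonempty parts
--         if t == 1:
--             return subsum(mask)
--         key = (mask, t)
--         if key in memo:
--             return memo[key]
--         low = mask & -mask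
--         rest = mask ^ low
--         res = None
--         sub = rest
--         while True:
--             part = low | sub
--             rem = mask ^ part
--             cand = subsum(part) if rem == 0 else max(subsum(part), best(rem, t - 1))
--             if res is None or cand < res:
--                 res = cand
--             if sub == 0:
--                 break
--             sub = (sub - 1) & rest
--         memo[key] = res
--         return res
--
--     return best((1 << n) - 1, k)
-- ===== Notes on version B (the rewrite author's own statement) =====
-- stated objective: alternative
-- what changed: A fills a bottom-up 2^n subset-sum table and runs k-1 in-place rounds of submask-DP over all masks; B recursively enumerates partitions top-down, always splitting off the part that contains the lowest remaining cookie (memoized on (mask, parts-left)), computing subset sums on demand.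
-- outside the precondition, e.g. on distributeCookies2([1, 2], 0): A returns 3, B returns 2
import Mathlib
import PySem

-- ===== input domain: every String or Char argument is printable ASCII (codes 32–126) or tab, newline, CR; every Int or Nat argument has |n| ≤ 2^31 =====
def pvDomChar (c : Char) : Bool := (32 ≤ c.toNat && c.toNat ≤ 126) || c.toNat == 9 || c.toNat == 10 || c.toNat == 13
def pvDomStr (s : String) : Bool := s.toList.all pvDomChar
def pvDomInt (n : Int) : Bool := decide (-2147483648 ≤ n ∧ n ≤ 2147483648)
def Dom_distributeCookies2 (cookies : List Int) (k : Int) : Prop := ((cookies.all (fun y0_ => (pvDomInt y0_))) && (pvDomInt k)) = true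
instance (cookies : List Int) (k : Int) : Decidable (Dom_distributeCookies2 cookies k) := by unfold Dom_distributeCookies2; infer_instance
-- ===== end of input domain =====

-- B replaces A's bottom-up subset-sum table + (k-1) in-place submask-DP rounds by a memoized
-- top-down recursion that splits off the part containing the lowest remaining cookie (objective: alternative).

-- ===== PORT A =====
-- All Python ints here (masks, indices) are nonnegative, so they are carried as Nat; list reads
-- f[j^s], ss[s], f[j] are always in range in A's runs, so List.getD _ 0 is exact.
-- inner `while s:` loop; `(s - 1) &&& j` is Python's `(s - 1) & j`
def pvInnerA (ss : List Int) (j : Nat) (f : List Int) (s : Nat) : List Int :=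
  if _h : s = 0 then f
  else
    let v := f.getD (j ^^^ s) 0
    let v2 := if ss.getD s 0 > v then ss.getD s 0 else v
    let f2 := if v2 < f.getD j 0 then f.set j v2 else f
    pvInnerA ss j f2 ((s - 1) &&& j)
termination_by s
decreasing_by exact Nat.lt_of_le_of_lt Nat.and_le_left (by omega)

-- `for j in range(m-1, 0, -1)` ported as downward recursion on j (j, j-1, …, 1)
def pvPassA (ss : List Int) (f : List Int) : Nat → List Int
  | 0 => f
  | j + 1 => pvPassA ss (pvInnerA ss (j + 1) f (j + 1)) j

-- ss = [0]*(1<<n); for i, v in enumerate(cookies): bit = 1<<i; for j in range(bit): ss[bit|j] = ss[j] + v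
def pvBuildSS (cookies : List Int) : List Int :=
  cookies.zipIdx.foldl
    (fun ss vi =>
      let bit := 1 <<< vi.2
      (List.range bit).foldl (fun ss j => ss.set (bit ||| j) (ss.getD j 0 + vi.1)) ss)
    (List.replicate (1 <<< cookies.length) 0)

def distributeCookies2 (cookies : List Int) (k : Int) : Int :=
  let m := 1 <<< cookies.length
  let ss := pvBuildSS cookies
  -- f = ss.copy(); `for _ in range(1, k)` runs (k-1).toNat times (the loop variable is unused)
  let f := (List.range (k - 1).toNat).foldl (fun f _ => pvPassA ss f (m - 1)) ss
  (PySem.List.pyGet? f (-1)).getD 0   -- f[-1]; f has length 2^n ≥ 1, so this is exact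

-- ===== PORT B =====
-- `subsum`: s = 0; i = 0; while mask: if mask & 1: s += cookies[i]; mask >>= 1; i += 1
-- (cookies[i] is read only when bit i is set, and B only passes masks < 2^len, so getD is exact)
def pvSubsum (cookies : List Int) (mask i : Nat) (s : Int) : Int :=
  if _h : mask = 0 then s
  else pvSubsum cookies (mask >>> 1) (i + 1)
        (if mask &&& 1 = 1 then s + cookies.getD i 0 else s)
termination_by mask
decreasing_by simpa [Nat.shiftRight_eq_div_pow] using Nat.div_lt_self (by omega) (by omega)

mutual
-- `best(mask, t)`, memoized on the key (mask, t)
def pvBestB (c : List Int) (memo : PySem.Dict (Nat × Int) Int) (mask : Nat) (t : Int) :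
    Int × PySem.Dict (Nat × Int) Int :=
  if t = 1 then (pvSubsum c mask 0 0, memo)
  else
    match memo.get? (mask, t) with
    | some v => (v, memo)
    | none =>
      let low := mask ^^^ (mask &&& (mask - 1))   -- mask & -mask (lowest set bit), in Nat form; exact
      let rest := mask ^^^ low
      let r := pvBestGo c memo mask t low rest rest none
      -- r.1 is never none (the do-while body runs at least once); `return res` / `memo[key] = res`
      (r.1.getD 0, r.2.insert (mask, t) (r.1.getD 0))
termination_by (mask, mask + 2)
decreasing_by
  refine Prod.Lex.right _ ?_
  have h : mask ^^^ (mask ^^^ (mask &&& (mask - 1))) = mask &&& (mask - 1) := Nat.xor_xor_cancel_left ..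
  simp only [h]
  exact Nat.lt_succ_of_le (Nat.succ_le_succ Nat.and_le_left)

def pvBestGo (c : List Int) (memo : PySem.Dict (Nat × Int) Int) (mask : Nat) (t : Int)
    (low rest sub : Nat) (res : Option Int) : Option Int × PySem.Dict (Nat × Int) Int :=
  let part := low ||| sub
  let rem := mask ^^^ part
  let cm : Int × PySem.Dict (Nat × Int) Int :=
    if rem = 0 then (pvSubsum c part 0 0, memo)
    else if _h : rem < mask then
      -- rem < mask always holds here (part contains the lowest set bit of mask);
      -- the dite guard only justifies termination and changes nothing on reachable states
      let r := pvBestB c memo rem (t - 1)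
      (max (pvSubsum c part 0 0) r.1, r.2)
    else (0, memo)
  let res2 : Option Int :=
    match res with
    | none => some cm.1
    | some r0 => if cm.1 < r0 then some cm.1 else some r0
  if _h2 : sub = 0 then (res2, cm.2)
  else pvBestGo c cm.2 mask t low rest ((sub - 1) &&& rest) res2
termination_by (mask, sub + 1)
decreasing_by
  · exact Prod.Lex.left _ _ _h
  · refine Prod.Lex.right _ (Nat.succ_lt_succ ?_)
    exact Nat.lt_of_le_of_lt Nat.and_le_left (Nat.sub_lt (Nat.pos_of_ne_zero _h2) Nat.one_pos)
end

def distributeCookies2_alt (cookies : List Int) (k : Int) : Int :=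
  if cookies = [] then 0
  else (pvBestB cookies PySem.Dict.empty ((1 <<< cookies.length) - 1) k).1

-- ===== PRECONDITION & SPEC =====
-- Pre_ excludes k ≤ 0 with nonempty cookies: distributing cookies into no groups is unspecified —
-- A happens to return the total sum (its refinement loop never runs), B the unconstrained partition minimum.
def Pre_distributeCookies2 (cookies : List Int) (k : Int) : Prop := 1 ≤ k ∨ cookies = []
instance (cookies : List Int) (k : Int) : Decidable (Pre_distributeCookies2 cookies k) := by
  unfold Pre_distributeCookies2; infer_instance

def pvWitness_distributeCookies2 : List Int × Int := ([8, 15, 10, 20, 8], 2)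

def Spec_distributeCookies2 (cookies : List Int) (k : Int) (out : Int) : Prop :=
  out = distributeCookies2_alt cookies k
instance (cookies : List Int) (k : Int) (out : Int) : Decidable (Spec_distributeCookies2 cookies k out) := by
  unfold Spec_distributeCookies2; infer_instance

-- ===== CLAIM (what is proved, stated in full; the proofs are below) =====
def Claim_equal_distributeCookies2 : Prop := ∀ (cookies : List Int) (k : Int), Dom_distributeCookies2 cookies k → Pre_distributeCookies2 cookies k → Spec_distributeCookies2 cookies k (distributeCookies2 cookies k)

-- ===== LEMMAS AND PROOFS =====
-- Common ground: both programs compute the least `max of part sums` over the partitions of a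
-- bitmask into at most k nonempty parts (`pvSS` below); each side is proved to be `IsLeast` of it.

-- ---- bit toolkit ----
theorem pv_parity_iff (a b : Nat) : (a &&& b) % 2 = 1 ↔ (a % 2 = 1 ∧ b % 2 = 1) := by
  have h0 := Nat.testBit_and a b 0
  simp only [Nat.testBit_zero] at h0
  constructor
  · intro h
    have hb : (decide (a % 2 = 1) && decide (b % 2 = 1)) = true := by
      rw [← h0]; simp [h]
    simpa using hb
  · rintro ⟨h1, h2⟩
    have hb : decide ((a &&& b) % 2 = 1) = true := by
      rw [h0]; simp [h1, h2]
    simpa using hb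

theorem pv_and_decomp (a b : Nat) :
    a &&& b = 2 * (a / 2 &&& b / 2) + (if a % 2 = 1 ∧ b % 2 = 1 then 1 else 0) := by
  have hd : (a &&& b) / 2 = a / 2 &&& b / 2 := Nat.and_div_two
  have h0 := pv_parity_iff a b
  have hm2 := Nat.mod_two_eq_zero_or_one (a &&& b)
  by_cases hc : a % 2 = 1 ∧ b % 2 = 1
  · rw [if_pos hc]
    have := h0.mpr hc
    omega
  · rw [if_neg hc]
    have : ¬ (a &&& b) % 2 = 1 := fun h => hc (h0.mp h)
    omega

theorem pv_xor_parity (a b : Nat) : (a ^^^ b) % 2 = (a + b) % 2 := by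
  have h0 := Nat.testBit_xor a b 0
  simp only [Nat.testBit_zero] at h0
  have hm2 := Nat.mod_two_eq_zero_or_one (a ^^^ b)
  rcases Nat.mod_two_eq_zero_or_one a with ha | ha <;>
    rcases Nat.mod_two_eq_zero_or_one b with hb | hb <;>
      rw [ha, hb] at h0
  · have h1 : ¬((a ^^^ b) % 2 = 1) := of_decide_eq_false (by rw [h0]; rfl)
    omega
  · have h1 : (a ^^^ b) % 2 = 1 := of_decide_eq_true (by rw [h0]; rfl)
    omega
  · have h1 : (a ^^^ b) % 2 = 1 := of_decide_eq_true (by rw [h0]; rfl)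
    omega
  · have h1 : ¬((a ^^^ b) % 2 = 1) := of_decide_eq_false (by rw [h0]; rfl)
    omega

theorem pv_xor_decomp (a b : Nat) :
    a ^^^ b = 2 * (a / 2 ^^^ b / 2) + (a + b) % 2 := by
  have hd : (a ^^^ b) / 2 = a / 2 ^^^ b / 2 := Nat.xor_div_two
  have h0 := pv_xor_parity a b
  omega

-- a submask can be subtracted by xor
theorem pv_xor_sub {p m : Nat} (h : p &&& m = p) : (m ^^^ p) + p = m := by
  induction m using Nat.strong_induction_on generalizing p with
  | _ m IH =>
    rcases Nat.eq_zero_or_pos m with hm | hm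
    · subst hm
      have : p = 0 := by simpa using h.symm
      simp [this]
    · have h2 : p / 2 &&& m / 2 = p / 2 := by
        have := congrArg (· / 2) h; simpa [Nat.and_div_two] using this
      have IH2 := IH (m / 2) (Nat.div_lt_self hm (by omega)) h2
      have hx := pv_xor_decomp m p
      have hpar : p % 2 = 1 → m % 2 = 1 := by
        intro hp
        have h0 := congrArg (Nat.testBit · 0) h
        simp only [Nat.testBit_and, Nat.testBit_zero] at h0
        rcases Nat.mod_two_eq_zero_or_one m with hm2 | hm2 <;> simp [hp, hm2] at h0 <;> omega
      omega

theorem pv_submask_le {p m : Nat} (h : p &&& m = p) : p ≤ m := by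
  have := pv_xor_sub h; omega

theorem pv_xor_lt {p m : Nat} (h : p &&& m = p) (hp : p ≠ 0) : m ^^^ p < m := by
  have := pv_xor_sub h
  have : p ≥ 1 := Nat.pos_of_ne_zero hp
  omega

-- every submask of j smaller than s (s itself a submask of j) is ≤ (s-1) &&& j
theorem pv_L {x s j : Nat} (hx : x &&& j = x) (hs : s &&& j = s) (hlt : x < s) :
    x ≤ (s - 1) &&& j := by
  induction s using Nat.strong_induction_on generalizing x j with
  | _ s IH =>
    have hs2 : s / 2 &&& j / 2 = s / 2 := by
      have := congrArg (· / 2) hs; simpa [Nat.and_div_two] using this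
    have hx2 : x / 2 &&& j / 2 = x / 2 := by
      have := congrArg (· / 2) hx; simpa [Nat.and_div_two] using this
    have hxp : x % 2 = 1 → j % 2 = 1 := by
      intro hxx
      have h0 := congrArg (Nat.testBit · 0) hx
      simp only [Nat.testBit_and, Nat.testBit_zero] at h0
      rcases Nat.mod_two_eq_zero_or_one j with hj | hj <;> simp [hxx, hj] at h0 <;> omega
    rcases Nat.mod_two_eq_zero_or_one s with hp | hp
    · -- s even (and s > 0 since x < s)
      have hd := pv_and_decomp (s - 1) j
      have h1 : (s - 1) / 2 = s / 2 - 1 := by omega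
      have h1m : (s - 1) % 2 = 1 := by omega
      rw [h1, h1m] at hd
      rcases Nat.lt_trichotomy (x / 2) (s / 2) with hlt2 | heq | hgt
      · have hIH := IH (s / 2) (by omega) hx2 hs2 hlt2
        rcases Nat.mod_two_eq_zero_or_one x with hxm | hxm
        · rcases Nat.mod_two_eq_zero_or_one j with hj | hj <;> simp [hj] at hd <;> omega
        · have hj := hxp hxm
          simp [hj] at hd
          omega
      · omega
      · omega
    · -- s odd: (s-1) & j = 2 * (s/2 & j/2) = 2 * (s/2)
      have hd := pv_and_decomp (s - 1) j
      have h1 : (s - 1) / 2 = s / 2 := by omega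
      have h1m : (s - 1) % 2 = 0 := by omega
      rw [h1, h1m, hs2] at hd
      simp at hd
      omega

-- m ^^^ (m &&& (m-1)) is 2^i with i the least set bit of m
theorem pv_lowbit {m : Nat} (hm : m ≠ 0) :
    ∃ i, m ^^^ (m &&& (m - 1)) = 2 ^ i ∧ m.testBit i = true ∧ ∀ b, b < i → m.testBit b = false := by
  induction m using Nat.strong_induction_on with
  | _ m IH =>
    have hd := pv_and_decomp m (m - 1)
    have hx := pv_xor_decomp m (m &&& (m - 1))
    rcases Nat.mod_two_eq_zero_or_one m with hp | hp
    · -- even, m ≠ 0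
      have hm2 : m / 2 ≠ 0 := by omega
      obtain ⟨i, hi1, hi2, hi3⟩ := IH (m / 2) (by omega) hm2
      have h1 : (m - 1) / 2 = m / 2 - 1 := by omega
      have h1m : (m - 1) % 2 = 1 := by omega
      rw [h1] at hd
      simp [hp] at hd
      refine ⟨i + 1, ?_, ?_, ?_⟩
      · have hdiv : (m &&& (m - 1)) / 2 = m / 2 &&& (m / 2 - 1) := by omega
        have hmod : (m &&& (m - 1)) % 2 = 0 := by omega
        rw [hdiv] at hx
        have : (m + (m &&& (m - 1))) % 2 = 0 := by omega
        rw [this] at hx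
        rw [hx, hi1]
        ring
      · simpa [Nat.testBit_add_one] using hi2
      · intro b hb
        cases b with
        | zero => simp [Nat.testBit_zero]; omega
        | succ b' => simpa [Nat.testBit_add_one] using hi3 b' (by omega)
    · -- odd: lowbit is 1
      have h1 : (m - 1) / 2 = m / 2 := by omega
      have h1m : (m - 1) % 2 = 0 := by omega
      rw [h1, h1m] at hd
      simp [Nat.and_self] at hd
      refine ⟨0, ?_, ?_, ?_⟩
      · have hdiv : (m &&& (m - 1)) / 2 = m / 2 := by omega
        have hmod : (m &&& (m - 1)) % 2 = 0 := by omega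
        rw [hdiv] at hx
        have : (m + (m &&& (m - 1))) % 2 = 1 := by omega
        rw [this] at hx
        simp [hx]
      · simp [Nat.testBit_zero]; omega
      · intro b hb; omega

theorem pv_tb_of_submask {p m : Nat} (h : p &&& m = p) {i : Nat} (hi : p.testBit i = true) :
    m.testBit i = true := by
  have h0 := congrArg (Nat.testBit · i) h
  simp only [Nat.testBit_and] at h0
  rcases Bool.eq_false_or_eq_true (m.testBit i) with h' | h' <;> simp_all

theorem pv_submask_of_tb {p m : Nat} (h : ∀ i, p.testBit i = true → m.testBit i = true) :
    p &&& m = p := by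
  apply Nat.eq_of_testBit_eq; intro i
  simp only [Nat.testBit_and]
  rcases Bool.eq_false_or_eq_true (p.testBit i) with h' | h' <;> simp [h', h i]

theorem pv_xor_submask {p m : Nat} (h : p &&& m = p) : (m ^^^ p) &&& m = m ^^^ p := by
  apply pv_submask_of_tb; intro i hi
  rw [Nat.testBit_xor] at hi
  rcases Bool.eq_false_or_eq_true (p.testBit i) with h' | h'
  · exact pv_tb_of_submask h h'
  · rcases Bool.eq_false_or_eq_true (m.testBit i) with h'' | h''
    · exact h''
    · rw [h', h''] at hi; simp at hi

theorem pv_xor_disj {p m : Nat} (h : p &&& m = p) : (m ^^^ p) &&& p = 0 := by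
  apply Nat.eq_of_testBit_eq; intro i
  simp only [Nat.testBit_and, Nat.testBit_xor, Nat.zero_testBit]
  rcases Bool.eq_false_or_eq_true (p.testBit i) with h' | h'
  · simp [h', pv_tb_of_submask h h']
  · simp [h']

theorem pv_xor_or {p m : Nat} (h : p &&& m = p) : (m ^^^ p) ||| p = m := by
  apply Nat.eq_of_testBit_eq; intro i
  simp only [Nat.testBit_or, Nat.testBit_xor]
  rcases Bool.eq_false_or_eq_true (p.testBit i) with h' | h'
  · simp [h', pv_tb_of_submask h h']
  · simp [h']

theorem pv_and_or_self (a b : Nat) : a &&& (a ||| b) = a := by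
  apply Nat.eq_of_testBit_eq; intro i
  simp only [Nat.testBit_and, Nat.testBit_or]
  cases a.testBit i <;> simp

theorem pv_or_submask {a b m : Nat} (ha : a &&& m = a) (hb : b &&& m = b) :
    (a ||| b) &&& m = a ||| b := by
  apply pv_submask_of_tb; intro i hi
  simp only [Nat.testBit_or] at hi
  rcases Bool.eq_false_or_eq_true (a.testBit i) with h' | h'
  · exact pv_tb_of_submask ha h'
  · rw [h'] at hi
    simp only [Bool.false_or] at hi
    exact pv_tb_of_submask hb hi

theorem pv_submask_trans {a b m : Nat} (ha : a &&& b = a) (hb : b &&& m = b) : a &&& m = a :=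
  pv_submask_of_tb (fun i hi => pv_tb_of_submask hb (pv_tb_of_submask ha hi))

theorem pv_disj_mono {s b q : Nat} (hq : q &&& b = q) (hsb : s &&& b = 0) : s &&& q = 0 := by
  apply Nat.eq_of_testBit_eq; intro i
  have h0 := congrArg (Nat.testBit · i) hsb
  simp only [Nat.testBit_and, Nat.zero_testBit] at h0 ⊢
  rcases Bool.eq_false_or_eq_true (q.testBit i) with h' | h'
  · have hb := pv_tb_of_submask hq h'
    rw [hb] at h0
    simp at h0
    simp [h0]
  · simp [h']

theorem pv_or_add {a b : Nat} (h : a &&& b = 0) : a ||| b = a + b := by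
  have hsub : b &&& (a ||| b) = b := by
    apply pv_submask_of_tb; intro i hi; simp [Nat.testBit_or, hi]
  have hxor : (a ||| b) ^^^ b = a := by
    apply Nat.eq_of_testBit_eq; intro i
    have h0 := congrArg (Nat.testBit · i) h
    simp only [Nat.testBit_and, Nat.zero_testBit] at h0
    simp only [Nat.testBit_xor, Nat.testBit_or]
    rcases Bool.eq_false_or_eq_true (a.testBit i) with h' | h' <;>
      rcases Bool.eq_false_or_eq_true (b.testBit i) with h'' | h'' <;> simp_all
  have := pv_xor_sub hsub
  rw [hxor] at this
  omega

theorem pv_or_xor_cancel {p m : Nat} (h : p &&& m = 0) : (p ||| m) ^^^ p = m := by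
  apply Nat.eq_of_testBit_eq; intro i
  have h0 := congrArg (Nat.testBit · i) h
  simp only [Nat.testBit_and, Nat.zero_testBit] at h0
  simp only [Nat.testBit_xor, Nat.testBit_or]
  rcases Bool.eq_false_or_eq_true (p.testBit i) with h' | h' <;>
    rcases Bool.eq_false_or_eq_true (m.testBit i) with h'' | h'' <;> simp_all

-- ---- the model subset sum ----
def pvSubAux (c : List Int) (m i : Nat) : Int :=
  if _h : m = 0 then 0
  else (if m % 2 = 1 then c.getD i 0 else 0) + pvSubAux c (m / 2) (i + 1)
termination_by m
decreasing_by exact Nat.div_lt_self (by omega) (by omega)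

def pvSub (c : List Int) (m : Nat) : Int := pvSubAux c m 0

theorem pvSubAux_zero (c : List Int) (i : Nat) : pvSubAux c 0 i = 0 := by
  rw [pvSubAux]; simp

theorem pvSubAux_unfold (c : List Int) (m i : Nat) (h : m ≠ 0) :
    pvSubAux c m i = (if m % 2 = 1 then c.getD i 0 else 0) + pvSubAux c (m / 2) (i + 1) := by
  rw [pvSubAux]
  rw [dif_neg h]

theorem pv_sub_zero (c : List Int) : pvSub c 0 = 0 := by
  rw [pvSub, pvSubAux_zero]

theorem pvSubAux_add {a b : Nat} (h : a &&& b = 0) (c : List Int) :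
    ∀ i, pvSubAux c (a ||| b) i = pvSubAux c a i + pvSubAux c b i := by
  have key : ∀ n a b, a + b ≤ n → a &&& b = 0 →
      ∀ i, pvSubAux c (a ||| b) i = pvSubAux c a i + pvSubAux c b i := by
    intro n
    induction n with
    | zero =>
      intro a b hab _ i
      have ha : a = 0 := by omega
      have hb : b = 0 := by omega
      subst ha; subst hb
      simp [pvSubAux_zero]
    | succ n IH =>
      intro a b hab hd i
      by_cases ha : a = 0
      · subst ha
        rw [Nat.zero_or, pvSubAux_zero]
        ring
      · by_cases hb : b = 0
        · subst hb
          rw [Nat.or_zero, pvSubAux_zero]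
          ring
        · have hdiv : a / 2 &&& b / 2 = 0 := by
            have := congrArg (· / 2) hd
            simpa [Nat.and_div_two] using this
          have hpar : ¬(a % 2 = 1 ∧ b % 2 = 1) := by
            intro hcc
            have := (pv_parity_iff a b).mpr hcc
            omega
          have hadd := pv_or_add hd
          have hxo : (a ||| b) / 2 = a / 2 ||| b / 2 := Nat.or_div_two
          have hom : (a ||| b) % 2 = (a + b) % 2 := by omega
          have hne : a ||| b ≠ 0 := by omega
          rw [pvSubAux_unfold c (a ||| b) i hne, pvSubAux_unfold c a i ha,
              pvSubAux_unfold c b i hb, hxo, hom,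
              IH (a / 2) (b / 2) (by omega) hdiv (i + 1)]
          rcases Nat.mod_two_eq_zero_or_one a with h1 | h1 <;>
            rcases Nat.mod_two_eq_zero_or_one b with h2 | h2
          · rw [show (a + b) % 2 = 0 by omega]
            simp [h1, h2] <;> omega
          · rw [show (a + b) % 2 = 1 by omega]
            simp [h1, h2] <;> omega
          · rw [show (a + b) % 2 = 1 by omega]
            simp [h1, h2] <;> omega
          · exact absurd ⟨h1, h2⟩ hpar
  intro i
  exact key (a + b) a b le_rfl h i

theorem pv_sub_add {a b : Nat} (h : a &&& b = 0) (c : List Int) :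
    pvSub c (a ||| b) = pvSub c a + pvSub c b := pvSubAux_add h c 0

theorem pvSubAux_two_pow (c : List Int) : ∀ ix i, pvSubAux c (2 ^ ix) i = c.getD (i + ix) 0 := by
  intro ix
  induction ix with
  | zero =>
    intro i
    rw [pow_zero, pvSubAux_unfold c 1 i (by omega)]
    norm_num [pvSubAux_zero]
  | succ ix IH =>
    intro i
    have h2 : (2 : Nat) ^ (ix + 1) ≠ 0 := by positivity
    rw [pvSubAux_unfold c _ i h2]
    have hdiv : (2 : Nat) ^ (ix + 1) / 2 = 2 ^ ix := by rw [pow_succ]; omega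
    have hmod : (2 : Nat) ^ (ix + 1) % 2 = 0 := by rw [pow_succ]; omega
    rw [hdiv, hmod]
    rw [if_neg (by omega), IH (i + 1), zero_add]
    congr 1
    omega

theorem pv_sub_two_pow (c : List Int) (i : Nat) : pvSub c (2 ^ i) = c.getD i 0 := by
  have := pvSubAux_two_pow c i 0
  simpa [pvSub] using this

-- the port's bit-loop subsum equals the model
theorem pvSubsum_eq_aux (c : List Int) : ∀ m i s, pvSubsum c m i s = s + pvSubAux c m i := by
  intro m
  induction m using Nat.strong_induction_on with
  | _ m IH =>
    intro i s
    by_cases hm : m = 0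
    · subst hm
      rw [pvSubsum, pvSubAux_zero]
      simp
    · rw [pvSubsum, dif_neg hm, pvSubAux_unfold c m i hm]
      have hsh : m >>> 1 = m / 2 := by simp [Nat.shiftRight_eq_div_pow]
      have hone : m &&& 1 = m % 2 := Nat.and_one_is_mod m
      rw [hsh, hone, IH (m / 2) (Nat.div_lt_self (by omega) (by omega))]
      rcases Nat.mod_two_eq_zero_or_one m with h1 | h1 <;> simp [h1] <;> ring

theorem pvSubsum_eq (c : List Int) (m : Nat) : pvSubsum c m 0 0 = pvSub c m := by
  simpa [pvSub] using pvSubsum_eq_aux c m 0 0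

-- ---- partitions and their values ----
def pvPmax : List Int → Option Int
  | [] => none
  | x :: l => some (match pvPmax l with | none => x | some m => max x m)

def pvOr (P : List Nat) : Nat := P.foldr (· ||| ·) 0

def pvIsPartition (P : List Nat) (j : Nat) : Prop :=
  (∀ p ∈ P, p ≠ 0) ∧ P.Pairwise (fun a b => a &&& b = 0) ∧ pvOr P = j

def pvSS (c : List Int) (k : Nat) (j : Nat) : Set Int :=
  {v | ∃ P, pvIsPartition P j ∧ P ≠ [] ∧ P.length ≤ k ∧ pvPmax (P.map (pvSub c)) = some v}

theorem pv_pmax_perm {l l' : List Int} (h : l.Perm l') : pvPmax l = pvPmax l' := by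
  induction h with
  | nil => rfl
  | cons x _ IH => simp [pvPmax, IH]
  | swap x y l =>
    cases h' : pvPmax l <;> simp [pvPmax, h']
    · exact max_comm y x
    · exact max_left_comm y x _
  | trans _ _ IH1 IH2 => exact IH1.trans IH2

theorem pv_mem_or {p : Nat} {P : List Nat} (h : p ∈ P) : p &&& pvOr P = p := by
  induction P with
  | nil => cases h
  | cons q Q IH =>
    rcases List.mem_cons.mp h with rfl | h'
    · exact pv_and_or_self p _
    · have := IH h'
      show p &&& (q ||| pvOr Q) = p
      apply pv_submask_of_tb; intro i hi
      have := pv_tb_of_submask this hi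
      simp [Nat.testBit_or, this]

theorem pv_disj_or {s : Nat} {Q : List Nat} (h : ∀ q ∈ Q, s &&& q = 0) : s &&& pvOr Q = 0 := by
  induction Q with
  | nil => simp [pvOr]
  | cons q Q IH =>
    show s &&& (q ||| pvOr Q) = 0
    have h1 := h q (by simp)
    have h2 := IH (fun q hq => h q (by simp [hq]))
    apply Nat.eq_of_testBit_eq; intro i
    have hb1 := congrArg (Nat.testBit · i) h1
    have hb2 := congrArg (Nat.testBit · i) h2
    simp only [Nat.testBit_and, Nat.testBit_or, Nat.zero_testBit] at hb1 hb2 ⊢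
    rcases Bool.eq_false_or_eq_true (s.testBit i) with h' | h' <;> simp_all

theorem pv_part_cons {s j : Nat} {Q : List Nat} (hs : s &&& j = s) (hs0 : s ≠ 0)
    (hQ : pvIsPartition Q (j ^^^ s)) : pvIsPartition (s :: Q) j := by
  obtain ⟨h1, h2, h3⟩ := hQ
  refine ⟨?_, ?_, ?_⟩
  · intro p hp
    rcases List.mem_cons.mp hp with rfl | hp'
    · exact hs0
    · exact h1 p hp'
  · refine List.Pairwise.cons ?_ h2
    intro q hq
    have hq' : q &&& (j ^^^ s) = q := h3 ▸ pv_mem_or hq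
    have hdisj : s &&& (j ^^^ s) = 0 := by
      have := pv_xor_disj hs
      rw [Nat.land_comm] at this
      exact this
    exact pv_disj_mono hq' hdisj
  · show s ||| pvOr Q = j
    rw [h3]
    rw [Nat.lor_comm]
    exact pv_xor_or hs

theorem pv_part_head {p j : Nat} {Q : List Nat} (h : pvIsPartition (p :: Q) j) :
    p &&& j = p ∧ p ≠ 0 ∧ pvIsPartition Q (j ^^^ p) := by
  obtain ⟨h1, h2, h3⟩ := h
  have hor : p ||| pvOr Q = j := h3
  have hdisj : p &&& pvOr Q = 0 :=
    pv_disj_or (fun q hq => List.rel_of_pairwise_cons h2 hq)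
  have hxq : j ^^^ p = pvOr Q := by rw [← hor]; exact pv_or_xor_cancel hdisj
  refine ⟨?_, h1 p (by simp), ?_, ?_, ?_⟩
  · rw [← hor]; exact pv_and_or_self p _
  · intro q hq; exact h1 q (by simp [hq])
  · exact h2.of_cons
  · exact hxq.symm

theorem pv_part_singleton {j : Nat} (hj : j ≠ 0) : pvIsPartition [j] j := by
  refine ⟨?_, ?_, ?_⟩
  · intro p hp; simp at hp; subst hp; exact hj
  · simp
  · simp [pvOr]

theorem pv_part_nonzero {P : List Nat} {j : Nat} (h : pvIsPartition P j) (hP : P ≠ []) : j ≠ 0 := by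
  obtain ⟨h1, _, h3⟩ := h
  cases P with
  | nil => exact absurd rfl hP
  | cons p Q =>
    have hp0 : p ≠ 0 := h1 p (by simp)
    have hsub : p &&& j = p := h3 ▸ pv_mem_or (by simp)
    have := pv_submask_le hsub
    omega

theorem pv_or_perm {P Q : List Nat} (h : P.Perm Q) : pvOr P = pvOr Q := by
  induction h with
  | nil => rfl
  | cons x _ IH =>
    simp only [pvOr, List.foldr_cons] at IH ⊢
    rw [IH]
  | swap x y l =>
    simp only [pvOr, List.foldr_cons]
    rw [← Nat.lor_assoc, ← Nat.lor_assoc, Nat.lor_comm x y]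
  | trans _ _ IH1 IH2 => rw [IH1, IH2]

theorem pv_part_perm {P Q : List Nat} {j : Nat} (h : pvIsPartition P j) (hperm : P.Perm Q) :
    pvIsPartition Q j := by
  obtain ⟨h1, h2, h3⟩ := h
  refine ⟨fun p hp => h1 p (hperm.mem_iff.mpr hp), ?_, ?_⟩
  · exact ((hperm.pairwise_iff (fun hxy => by rw [Nat.land_comm]; exact hxy)).mp h2)
  · rw [← h3]
    exact (pv_or_perm hperm).symm

theorem pv_mem_SS_self {c : List Int} {k j : Nat} (hj : j ≠ 0) (hk : 1 ≤ k) :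
    pvSub c j ∈ pvSS c k j :=
  ⟨[j], pv_part_singleton hj, by simp, by simpa using hk, by simp [pvPmax]⟩

theorem pv_SS_mono {c : List Int} {k k' j : Nat} (h : k ≤ k') : pvSS c k j ⊆ pvSS c k' j := by
  rintro v ⟨P, hP, hne, hlen, hval⟩
  exact ⟨P, hP, hne, hlen.trans h, hval⟩

theorem pv_exists_mem_testBit {P : List Nat} {j i : Nat} (h : pvOr P = j)
    (hi : j.testBit i = true) : ∃ p ∈ P, p.testBit i = true := by
  subst h
  induction P with
  | nil => simp [pvOr, Nat.zero_testBit] at hi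
  | cons q Q IH =>
    have : (q ||| pvOr Q).testBit i = true := hi
    rw [Nat.testBit_or] at this
    rcases Bool.or_eq_true_iff.mp this with h' | h'
    · exact ⟨q, by simp, h'⟩
    · obtain ⟨p, hp, hb⟩ := IH h'
      exact ⟨p, by simp [hp], hb⟩

theorem pvPmax_cons_some {a : Int} {l : List Int} {w : Int} (h : pvPmax l = some w) :
    pvPmax (a :: l) = some (max a w) := by simp [pvPmax, h]

theorem pvPmax_ne_none {l : List Int} (h : l ≠ []) : ∃ w, pvPmax l = some w := by
  cases l with
  | nil => exact absurd rfl h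
  | cons x l => exact ⟨_, rfl⟩

-- the least value over one-part partitions
theorem pv_base_isLeast (c : List Int) {j : Nat} (hj : j ≠ 0) :
    IsLeast (pvSS c 1 j) (pvSub c j) := by
  constructor
  · exact pv_mem_SS_self hj le_rfl
  · rintro v ⟨P, hP, hne, hlen, hval⟩
    match P, hne, hlen with
    | [p], _, _ =>
      have hor : pvOr [p] = j := hP.2.2
      simp [pvOr] at hor
      subst hor
      simp [pvPmax] at hval
      omega
    | p :: q :: r, _, hlen => simp at hlen

-- ---- model of A's inner loop and DP table ----
def pvVF (ssf prev : Nat → Int) (j : Nat) (s : Nat) (cur : Int) : Int :=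
  if _h : s = 0 then cur
  else pvVF ssf prev j ((s - 1) &&& j) (min cur (max (prev (j ^^^ s)) (ssf s)))
termination_by s
decreasing_by exact Nat.lt_of_le_of_lt Nat.and_le_left (by omega)

def pvG (ssf : Nat → Int) : Nat → Nat → Int
  | 0, j => ssf j
  | t + 1, j => pvVF ssf (pvG ssf t) j j (pvG ssf t j)

theorem pvVF_zero (ssf prev : Nat → Int) (j : Nat) (cur : Int) :
    pvVF ssf prev j 0 cur = cur := by rw [pvVF]; simp

theorem pvVF_unfold (ssf prev : Nat → Int) (j s : Nat) (cur : Int) (h : s ≠ 0) :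
    pvVF ssf prev j s cur
      = pvVF ssf prev j ((s - 1) &&& j) (min cur (max (prev (j ^^^ s)) (ssf s))) := by
  rw [pvVF]
  rw [dif_neg h]

theorem pvG_succ_zero (ssf : Nat → Int) (t : Nat) : pvG ssf (t + 1) 0 = pvG ssf t 0 := by
  show pvVF _ _ 0 0 _ = _
  rw [pvVF_zero]

theorem pvG_zero (ssf : Nat → Int) (h : ssf 0 = 0) : ∀ t, pvG ssf t 0 = 0
  | 0 => h
  | t + 1 => by rw [pvG_succ_zero]; exact pvG_zero ssf h t

theorem pv_nxt_submask (s j : Nat) : ((s - 1) &&& j) &&& j = (s - 1) &&& j := by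
  rw [Nat.and_assoc, Nat.and_self]

theorem pv_nxt_lt {s : Nat} (j : Nat) (h : s ≠ 0) : (s - 1) &&& j < s :=
  Nat.lt_of_le_of_lt Nat.and_le_left (by omega)

theorem pv_xor_ne {s j : Nat} (h : s ≠ 0) : j ^^^ s ≠ j := by
  intro hc
  have : j ^^^ (j ^^^ s) = j ^^^ j := by rw [hc]
  rw [Nat.xor_xor_cancel_left, Nat.xor_self] at this
  exact h this

theorem pvVF_le (ssf prev : Nat → Int) (j : Nat) :
    ∀ s cur, pvVF ssf prev j s cur ≤ cur := by
  intro s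
  induction s using Nat.strong_induction_on with
  | _ s IH =>
    intro cur
    rw [pvVF]
    by_cases h0 : s = 0
    · simp [h0]
    · rw [dif_neg h0]
      exact le_trans (IH _ (pv_nxt_lt j h0) _) (min_le_left _ _)

theorem pvVF_le_cand (ssf prev : Nat → Int) (j : Nat) :
    ∀ s cur, s &&& j = s → ∀ x, x ≠ 0 → x &&& j = x → x ≤ s →
      pvVF ssf prev j s cur ≤ max (prev (j ^^^ x)) (ssf x) := by
  intro s
  induction s using Nat.strong_induction_on with
  | _ s IH =>
    intro cur hs x hx0 hxj hxs
    have h0 : s ≠ 0 := by intro h; subst h; omega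
    rw [pvVF, dif_neg h0]
    rcases eq_or_lt_of_le hxs with rfl | hlt
    · exact le_trans (pvVF_le _ _ _ _ _) (le_trans (min_le_right _ _) le_rfl)
    · have hxle : x ≤ (s - 1) &&& j := pv_L hxj hs hlt
      exact IH _ (pv_nxt_lt j h0) _ (pv_nxt_submask s j) x hx0 hxj hxle

theorem pvVF_cases (ssf prev : Nat → Int) (j : Nat) :
    ∀ s cur, s &&& j = s → (pvVF ssf prev j s cur = cur ∨
      ∃ x, x ≠ 0 ∧ x &&& j = x ∧ x ≤ s ∧
        pvVF ssf prev j s cur = max (prev (j ^^^ x)) (ssf x)) := by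
  intro s
  induction s using Nat.strong_induction_on with
  | _ s IH =>
    intro cur hs
    by_cases h0 : s = 0
    · subst h0; left; exact pvVF_zero ..
    · rw [pvVF, dif_neg h0]
      rcases IH _ (pv_nxt_lt j h0) (min cur (max (prev (j ^^^ s)) (ssf s)))
          (pv_nxt_submask s j) with hc | ⟨x, hx0, hxj, hxs, hc⟩
      · rcases min_choice cur (max (prev (j ^^^ s)) (ssf s)) with hm | hm
        · left; rw [hc, hm]
        · right; exact ⟨s, h0, hs, le_rfl, by rw [hc, hm]⟩
      · right; exact ⟨x, hx0, hxj, le_trans hxs (le_of_lt (pv_nxt_lt j h0)), hc⟩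

theorem pvVF_congr_ne {ssf : Nat → Int} {prev prev' : Nat → Int} {j : Nat}
    (hprev : ∀ x, x ≠ j → prev x = prev' x) :
    ∀ s cur, pvVF ssf prev j s cur = pvVF ssf prev' j s cur := by
  intro s
  induction s using Nat.strong_induction_on with
  | _ s IH =>
    intro cur
    by_cases h0 : s = 0
    · subst h0; rw [pvVF_zero, pvVF_zero]
    · rw [pvVF_unfold _ _ _ _ _ h0, pvVF_unfold _ _ _ _ _ h0,
          hprev _ (pv_xor_ne h0)]
      exact IH _ (pv_nxt_lt j h0) _

theorem pvVF_congr {ssf ssf' prev prev' : Nat → Int} {j : Nat}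
    (hssf : ∀ x, x ≠ 0 → x &&& j = x → ssf x = ssf' x)
    (hprev : ∀ x, x &&& j = x → x ≠ j → prev x = prev' x) :
    ∀ s cur, s &&& j = s → pvVF ssf prev j s cur = pvVF ssf' prev' j s cur := by
  intro s
  induction s using Nat.strong_induction_on with
  | _ s IH =>
    intro cur hs
    by_cases h0 : s = 0
    · subst h0; rw [pvVF_zero, pvVF_zero]
    · rw [pvVF_unfold _ _ _ _ _ h0, pvVF_unfold _ _ _ _ _ h0,
          hprev _ (pv_xor_submask hs) (pv_xor_ne h0), hssf s h0 hs]
      exact IH _ (pv_nxt_lt j h0) _ (pv_nxt_submask s j)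

theorem pvG_isLeast (c : List Int) : ∀ t j, j ≠ 0 →
    IsLeast (pvSS c (t + 1) j) (pvG (pvSub c) t j) := by
  intro t
  induction t with
  | zero => intro j hj; exact pv_base_isLeast c hj
  | succ t IH =>
    intro j hj
    have hGj_le : pvG (pvSub c) t j ≤ pvSub c j := (IH j hj).2 (pv_mem_SS_self hj (by omega))
    have hresdef : pvG (pvSub c) (t + 1) j
        = pvVF (pvSub c) (pvG (pvSub c) t) j j (pvG (pvSub c) t j) := rfl
    have hRle : pvG (pvSub c) (t + 1) j ≤ pvG (pvSub c) t j := by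
      rw [hresdef]; exact pvVF_le ..
    constructor
    · -- membership
      rcases pvVF_cases (pvSub c) (pvG (pvSub c) t) j j (pvG (pvSub c) t j) (Nat.and_self j)
        with hcase | ⟨x, hx0, hxj, hxs, hcase⟩
      · rw [hresdef, hcase]
        exact pv_SS_mono (by omega) (IH j hj).1
      · rw [← hresdef] at hcase
        by_cases hrem : j ^^^ x = 0
        · have hxeq : x = j := by have := pv_xor_sub hxj; omega
          subst hxeq
          rw [Nat.xor_self] at hcase
          have h2 : pvSub c x ≤ pvG (pvSub c) (t + 1) x := by
            rw [hcase]; exact le_max_right _ _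
          have heq : pvG (pvSub c) (t + 1) x = pvG (pvSub c) t x :=
            le_antisymm hRle (le_trans hGj_le h2)
          rw [heq]
          exact pv_SS_mono (by omega) (IH x hj).1
        · obtain ⟨Q, hQ, hQne, hQlen, hQval⟩ := (IH (j ^^^ x) hrem).1
          refine ⟨x :: Q, pv_part_cons hxj hx0 hQ, by simp, by simp; omega, ?_⟩
          simp only [List.map_cons]
          rw [pvPmax_cons_some hQval, hcase, max_comm]
    · -- lower bound
      rintro v ⟨P, hP, hne, hlen, hval⟩
      by_cases hsmall : P.length ≤ t + 1
      · exact le_trans hRle ((IH j hj).2 ⟨P, hP, hne, hsmall, hval⟩)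
      · match P, hne with
        | p :: Q, _ =>
          have hQne : Q ≠ [] := by
            intro h; subst h; simp at hsmall
          obtain ⟨hpj, hp0, hQpart⟩ := pv_part_head hP
          have hrem0 : j ^^^ p ≠ 0 := pv_part_nonzero hQpart hQne
          obtain ⟨w, hw⟩ := pvPmax_ne_none (l := Q.map (pvSub c)) (by simpa using hQne)
          have hvval : v = max (pvSub c p) w := by
            simp only [List.map_cons] at hval
            rw [pvPmax_cons_some hw] at hval
            exact (Option.some.inj hval).symm
          have hQlen : Q.length ≤ t + 1 := by simp at hlen; omega
          have h1 : pvG (pvSub c) t (j ^^^ p) ≤ w :=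
            (IH _ hrem0).2 ⟨Q, hQpart, hQne, hQlen, hw⟩
          have h2 : pvG (pvSub c) (t + 1) j ≤ max (pvG (pvSub c) t (j ^^^ p)) (pvSub c p) := by
            rw [hresdef]
            exact pvVF_le_cand _ _ _ _ _ (Nat.and_self j) p hp0 hpj (pv_submask_le hpj)
          calc pvG (pvSub c) (t + 1) j
              ≤ max (pvG (pvSub c) t (j ^^^ p)) (pvSub c p) := h2
            _ ≤ max w (pvSub c p) := max_le_max h1 le_rfl
            _ = v := by rw [max_comm, ← hvval]

-- ---- model of B (memo removed) ----
mutual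
def pvBB (c : List Int) (mask : Nat) (t : Int) : Int :=
  if t = 1 then pvSub c mask
  else
    let low := mask ^^^ (mask &&& (mask - 1))
    let rest := mask ^^^ low
    pvBBGo c mask t low rest rest
termination_by (mask, mask + 2)
decreasing_by
  refine Prod.Lex.right _ ?_
  have h : mask ^^^ (mask ^^^ (mask &&& (mask - 1))) = mask &&& (mask - 1) := Nat.xor_xor_cancel_left ..
  simp only [h]
  exact Nat.lt_succ_of_le (Nat.succ_le_succ Nat.and_le_left)

def pvBBGo (c : List Int) (mask : Nat) (t : Int) (low rest sub : Nat) : Int :=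
  let part := low ||| sub
  let rem := mask ^^^ part
  let cand : Int :=
    if rem = 0 then pvSub c part
    else if _h : rem < mask then max (pvSub c part) (pvBB c rem (t - 1))
    else 0
  if _h2 : sub = 0 then cand
  else min cand (pvBBGo c mask t low rest ((sub - 1) &&& rest))
termination_by (mask, sub + 1)
decreasing_by
  · exact Prod.Lex.left _ _ _h
  · refine Prod.Lex.right _ (Nat.succ_lt_succ ?_)
    exact Nat.lt_of_le_of_lt Nat.and_le_left (Nat.sub_lt (Nat.pos_of_ne_zero _h2) Nat.one_pos)
end

def pvCand (c : List Int) (mask : Nat) (t : Int) (low x : Nat) : Int :=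
  if mask ^^^ (low ||| x) = 0 then pvSub c (low ||| x)
  else max (pvSub c (low ||| x)) (pvBB c (mask ^^^ (low ||| x)) (t - 1))

theorem pv_part_facts {low mask x rest : Nat} (hlowm : low &&& mask = low) (hlow0 : low ≠ 0)
    (hrest : rest = mask ^^^ low) (hx : x &&& rest = x) :
    (low ||| x) &&& mask = low ||| x ∧ low ||| x ≠ 0 ∧ mask ^^^ (low ||| x) < mask := by
  have hrm : rest &&& mask = rest := hrest ▸ pv_xor_submask hlowm
  have hxm : x &&& mask = x := pv_submask_trans hx hrm
  have hpart : (low ||| x) &&& mask = low ||| x := pv_or_submask hlowm hxm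
  have hpart0 : low ||| x ≠ 0 := by
    intro h
    apply hlow0
    have h2 := pv_and_or_self low x
    rw [h, Nat.and_zero] at h2
    exact h2.symm
  exact ⟨hpart, hpart0, pv_xor_lt hpart hpart0⟩

theorem pvBBGo_unfold (c : List Int) (mask : Nat) (t : Int) {low rest : Nat} (sub : Nat)
    (hlowm : low &&& mask = low) (hlow0 : low ≠ 0) (hrest : rest = mask ^^^ low)
    (hsub : sub &&& rest = sub) :
    pvBBGo c mask t low rest sub =
      if sub = 0 then pvCand c mask t low sub
      else min (pvCand c mask t low sub) (pvBBGo c mask t low rest ((sub - 1) &&& rest)) := by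
  obtain ⟨hpart, hpart0, hlt⟩ := pv_part_facts hlowm hlow0 hrest hsub
  rw [pvBBGo]
  by_cases hrem : mask ^^^ (low ||| sub) = 0
  · simp only [hrem, if_pos rfl, pvCand, if_pos hrem]
    split <;> rfl
  · simp only [if_neg hrem, dif_pos hlt, pvCand, if_neg hrem]
    split <;> rfl

theorem pvBBGo_props (c : List Int) (mask : Nat) (t : Int) (low rest : Nat)
    (hlowm : low &&& mask = low) (hlow0 : low ≠ 0) (hrest : rest = mask ^^^ low) :
    ∀ sub, sub &&& rest = sub →
      ((∃ x, x &&& rest = x ∧ pvBBGo c mask t low rest sub = pvCand c mask t low x) ∧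
       (∀ x, x &&& rest = x → x ≤ sub → pvBBGo c mask t low rest sub ≤ pvCand c mask t low x)) := by
  intro sub
  induction sub using Nat.strong_induction_on with
  | _ sub IH =>
    intro hsub
    rw [pvBBGo_unfold c mask t sub hlowm hlow0 hrest hsub]
    by_cases h0 : sub = 0
    · subst h0
      simp only [if_pos rfl]
      refine ⟨⟨0, by simp [Nat.zero_and], rfl⟩, ?_⟩
      intro x hx hxle
      have hx0 : x = 0 := by omega
      subst hx0; exact le_rfl
    · rw [if_neg h0]
      have hnsub : ((sub - 1) &&& rest) &&& rest = (sub - 1) &&& rest := by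
        rw [Nat.and_assoc, Nat.and_self]
      have hnlt : (sub - 1) &&& rest < sub :=
        Nat.lt_of_le_of_lt Nat.and_le_left (by omega)
      obtain ⟨⟨y, hy, hyval⟩, hlb⟩ := IH _ hnlt hnsub
      constructor
      · rcases min_choice (pvCand c mask t low sub) (pvBBGo c mask t low rest ((sub - 1) &&& rest)) with hm | hm
        · exact ⟨sub, hsub, hm⟩
        · exact ⟨y, hy, by rw [hm, hyval]⟩
      · intro x hx hxle
        rcases eq_or_lt_of_le hxle with rfl | hlt
        · exact min_le_left _ _
        · have : x ≤ (sub - 1) &&& rest := pv_L hx hsub hlt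
          exact le_trans (min_le_right _ _) (hlb x hx this)

theorem pvBB_isLeast (c : List Int) : ∀ mask, mask ≠ 0 → ∀ t : Int, 1 ≤ t →
    IsLeast (pvSS c t.toNat mask) (pvBB c mask t) := by
  intro mask
  induction mask using Nat.strong_induction_on with
  | _ mask IHm =>
    intro hm t ht
    rw [pvBB]
    by_cases ht1 : t = 1
    · subst ht1
      simp only [if_pos rfl]
      exact pv_base_isLeast c hm
    · rw [if_neg ht1]
      have ht2 : 2 ≤ t := by omega
      obtain ⟨i, hlowpow, hbit, hleast⟩ := pv_lowbit hm
      have hlowm : (mask ^^^ (mask &&& (mask - 1))) &&& mask = mask ^^^ (mask &&& (mask - 1)) := by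
        rw [hlowpow]
        apply pv_submask_of_tb
        intro b hb
        rw [Nat.testBit_two_pow] at hb
        have : i = b := by simpa using hb
        subst this; exact hbit
      have hlow0 : mask ^^^ (mask &&& (mask - 1)) ≠ 0 := by
        rw [hlowpow]; positivity
      have hprops := pvBBGo_props c mask t (mask ^^^ (mask &&& (mask - 1)))
        (mask ^^^ (mask ^^^ (mask &&& (mask - 1)))) hlowm hlow0 rfl
        (mask ^^^ (mask ^^^ (mask &&& (mask - 1)))) (Nat.and_self _)
      set low := mask ^^^ (mask &&& (mask - 1)) with hlowdef
      set rest := mask ^^^ low with hrestdef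
      constructor
      · -- membership
        obtain ⟨x, hx, hxval⟩ := hprops.1
        obtain ⟨hpart, hpart0, hremlt⟩ := pv_part_facts hlowm hlow0 rfl hx
        rw [hxval]
        by_cases hrem : mask ^^^ (low ||| x) = 0
        · have hpm : low ||| x = mask := by
            have := pv_xor_sub hpart
            omega
          rw [pvCand, if_pos hrem, hpm]
          exact pv_mem_SS_self hm (by omega)
        · have hrIH := IHm _ hremlt hrem (t - 1) (by omega)
          obtain ⟨Q, hQ, hQne, hQlen, hQval⟩ := hrIH.1
          rw [pvCand, if_neg hrem]
          refine ⟨(low ||| x) :: Q, pv_part_cons hpart hpart0 hQ, by simp, by simp; omega, ?_⟩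
          simp only [List.map_cons]
          rw [pvPmax_cons_some hQval]
      · -- lower bound
        rintro v ⟨P, hP, hne, hlen, hval⟩
        obtain ⟨pstar, hpmem, hpbit⟩ := pv_exists_mem_testBit hP.2.2 hbit
        have hperm := List.perm_cons_erase hpmem
        have hP' := pv_part_perm hP hperm
        have hval' : pvPmax ((pstar :: P.erase pstar).map (pvSub c)) = some v := by
          rw [← pv_pmax_perm (hperm.map (pvSub c))]
          exact hval
        have hlen' : (pstar :: P.erase pstar).length ≤ t.toNat := by
          rw [← hperm.length_eq]; exact hlen
        obtain ⟨hpj, hp0, hQpart⟩ := pv_part_head hP'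
        have hlowp : low &&& pstar = low := by
          rw [hlowpow]
          apply pv_submask_of_tb
          intro b hb
          rw [Nat.testBit_two_pow] at hb
          have : i = b := by simpa using hb
          subst this; exact hpbit
        have hxdef : low ||| (pstar ^^^ low) = pstar := by
          rw [Nat.lor_comm]; exact pv_xor_or hlowp
        have hxsub : (pstar ^^^ low) &&& rest = pstar ^^^ low := by
          rw [hrestdef]
          apply pv_submask_of_tb
          intro b hb
          rw [Nat.testBit_xor] at hb ⊢
          rcases Bool.eq_false_or_eq_true (low.testBit b) with hl | hl
          · rw [hl] at hb
            have hp : pstar.testBit b = true := pv_tb_of_submask hlowp hl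
            rw [hp] at hb
            simp at hb
          · rw [hl] at hb ⊢
            simp only [Bool.xor_false] at hb ⊢
            exact pv_tb_of_submask hpj hb
        have hrem : mask ^^^ (low ||| (pstar ^^^ low)) = mask ^^^ pstar := by rw [hxdef]
        by_cases hQ0 : P.erase pstar = []
        · -- one part: pstar = mask, v = pvSub c mask
          have hpm : pstar = mask := by
            have hor : pvOr (pstar :: P.erase pstar) = mask := hP'.2.2
            rw [hQ0] at hor
            simpa [pvOr] using hor
          have hv : v = pvSub c mask := by
            rw [hQ0] at hval'
            simp [pvPmax] at hval'
            rw [← hval', hpm]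
          have hcand : pvCand c mask t low (pstar ^^^ low) = pvSub c mask := by
            rw [pvCand, hxdef, hpm, Nat.xor_self, if_pos rfl]
          rw [hv, ← hcand]
          exact hprops.2 _ hxsub (pv_submask_le hxsub)
        · have hrem0 : mask ^^^ pstar ≠ 0 := pv_part_nonzero hQpart hQ0
          obtain ⟨w, hw⟩ := pvPmax_ne_none (l := (P.erase pstar).map (pvSub c)) (by simpa using hQ0)
          have hvval : v = max (pvSub c pstar) w := by
            simp only [List.map_cons] at hval'
            rw [pvPmax_cons_some hw] at hval'
            exact (Option.some.inj hval').symm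
          have hQlen : (P.erase pstar).length ≤ (t - 1).toNat := by
            simp at hlen'; omega
          have h1 : pvBB c (mask ^^^ pstar) (t - 1) ≤ w :=
            (IHm _ (pv_xor_lt hpj hp0) hrem0 (t - 1) (by omega)).2
              ⟨P.erase pstar, hQpart, hQ0, hQlen, hw⟩
          have hcand : pvCand c mask t low (pstar ^^^ low)
              = max (pvSub c pstar) (pvBB c (mask ^^^ pstar) (t - 1)) := by
            rw [pvCand, hrem, if_neg hrem0, hxdef]
          calc pvBBGo c mask t low rest rest
              ≤ pvCand c mask t low (pstar ^^^ low) := hprops.2 _ hxsub (pv_submask_le hxsub)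
            _ = max (pvSub c pstar) (pvBB c (mask ^^^ pstar) (t - 1)) := hcand
            _ ≤ max (pvSub c pstar) w := max_le_max le_rfl h1
            _ = v := hvval.symm

-- ---- the memoized port computes pvBB ----
theorem pv_min_acc1 {p r0 : Int} (g : Int) (h : p < r0) : min r0 (min p g) = min p g :=
  min_eq_right (le_trans (min_le_left _ _) (le_of_lt h))

theorem pv_min_acc2 {p r0 : Int} (g : Int) (h : ¬ p < r0) : min r0 (min p g) = min r0 g := by
  rw [min_left_comm]
  exact min_eq_right (le_trans (min_le_left _ _) (not_lt.mp h))

def pvInv (c : List Int) (memo : PySem.Dict (Nat × Int) Int) : Prop :=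
  ∀ m t v, memo.get? (m, t) = some v → v = pvBB c m t

theorem pvBestB_eq (c : List Int) :
    ∀ mask (t : Int) memo, pvInv c memo →
      (pvBestB c memo mask t).1 = pvBB c mask t ∧ pvInv c (pvBestB c memo mask t).2 := by
  intro mask
  induction mask using Nat.strong_induction_on with
  | _ mask IHm =>
    have go : ∀ (t : Int) (low rest sub : Nat), ∀ res memo, pvInv c memo →
        (pvBestGo c memo mask t low rest sub res).1 =
          some (match res with
                | none => pvBBGo c mask t low rest sub
                | some r0 => min r0 (pvBBGo c mask t low rest sub)) ∧
        pvInv c (pvBestGo c memo mask t low rest sub res).2 := by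
      intro t low rest sub
      induction sub using Nat.strong_induction_on with
      | _ sub IHs =>
        intro res memo hinv
        have hnlt : (sub - 1) &&& rest < sub ∨ sub = 0 := by
          by_cases h : sub = 0
          · exact Or.inr h
          · exact Or.inl (Nat.lt_of_le_of_lt Nat.and_le_left
              (Nat.sub_lt (Nat.pos_of_ne_zero h) Nat.one_pos))
        rw [pvBestGo.eq_def, pvBBGo]
        dsimp only
        by_cases hrem : mask ^^^ (low ||| sub) = 0
        · simp only [if_pos hrem, pvSubsum_eq]
          by_cases h2 : sub = 0
          · simp only [dif_pos h2]
            rcases res with _ | r0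
            · exact ⟨rfl, hinv⟩
            · refine ⟨?_, hinv⟩
              dsimp only
              split <;> rename_i h
              · rw [min_eq_right (le_of_lt h)]
              · rw [min_eq_left (not_lt.mp h)]
          · simp only [dif_neg h2]
            rcases res with _ | r0
            · exact IHs _ (hnlt.resolve_right h2) _ _ hinv
            · by_cases hpr : pvSub c (low ||| sub) < r0
              · simp only [if_pos hpr]
                obtain ⟨h1, h1'⟩ := IHs _ (hnlt.resolve_right h2) (some (pvSub c (low ||| sub))) _ hinv
                dsimp only at h1
                exact ⟨by rw [h1, pv_min_acc1 _ hpr], h1'⟩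
              · simp only [if_neg hpr]
                obtain ⟨h1, h1'⟩ := IHs _ (hnlt.resolve_right h2) (some r0) _ hinv
                dsimp only at h1
                exact ⟨by rw [h1, pv_min_acc2 _ hpr], h1'⟩
        · by_cases hlt : mask ^^^ (low ||| sub) < mask
          · simp only [if_neg hrem, dif_pos hlt]
            obtain ⟨hb1, hb2⟩ := IHm _ hlt (t - 1) memo hinv
            rw [pvSubsum_eq, hb1]
            by_cases h2 : sub = 0
            · simp only [dif_pos h2]
              rcases res with _ | r0
              · exact ⟨rfl, hb2⟩
              · refine ⟨?_, hb2⟩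
                dsimp only
                split <;> rename_i h
                · rw [min_eq_right (le_of_lt h)]
                · rw [min_eq_left (not_lt.mp h)]
            · simp only [dif_neg h2]
              rcases res with _ | r0
              · exact IHs _ (hnlt.resolve_right h2) _ _ hb2
              · by_cases hpr : max (pvSub c (low ||| sub)) (pvBB c (mask ^^^ (low ||| sub)) (t - 1)) < r0
                · simp only [if_pos hpr]
                  obtain ⟨h1, h1'⟩ := IHs _ (hnlt.resolve_right h2)
                    (some (max (pvSub c (low ||| sub)) (pvBB c (mask ^^^ (low ||| sub)) (t - 1)))) _ hb2
                  dsimp only at h1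
                  exact ⟨by rw [h1, pv_min_acc1 _ hpr], h1'⟩
                · simp only [if_neg hpr]
                  obtain ⟨h1, h1'⟩ := IHs _ (hnlt.resolve_right h2) (some r0) _ hb2
                  dsimp only at h1
                  exact ⟨by rw [h1, pv_min_acc2 _ hpr], h1'⟩
          · simp only [if_neg hrem, dif_neg hlt]
            by_cases h2 : sub = 0
            · simp only [dif_pos h2]
              rcases res with _ | r0
              · exact ⟨rfl, hinv⟩
              · refine ⟨?_, hinv⟩
                dsimp only
                split <;> rename_i h
                · rw [min_eq_right (le_of_lt h)]
                · rw [min_eq_left (not_lt.mp h)]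
            · simp only [dif_neg h2]
              rcases res with _ | r0
              · exact IHs _ (hnlt.resolve_right h2) _ _ hinv
              · by_cases hpr : (0 : Int) < r0
                · simp only [if_pos hpr]
                  obtain ⟨h1, h1'⟩ := IHs _ (hnlt.resolve_right h2) (some 0) _ hinv
                  dsimp only at h1
                  exact ⟨by rw [h1, pv_min_acc1 _ hpr], h1'⟩
                · simp only [if_neg hpr]
                  obtain ⟨h1, h1'⟩ := IHs _ (hnlt.resolve_right h2) (some r0) _ hinv
                  dsimp only at h1
                  exact ⟨by rw [h1, pv_min_acc2 _ hpr], h1'⟩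
    intro t memo hinv
    rw [pvBestB.eq_def]
    by_cases ht1 : t = 1
    · simp only [if_pos ht1]
      refine ⟨?_, hinv⟩
      rw [pvBB, if_pos ht1]
      exact pvSubsum_eq c mask
    · simp only [if_neg ht1]
      cases hhit : memo.get? (mask, t) with
      | some v =>
        simp only [hhit]
        exact ⟨hinv mask t v hhit, hinv⟩
      | none =>
        simp only [hhit]
        obtain ⟨hgo1, hgo2⟩ := go t (mask ^^^ (mask &&& (mask - 1)))
          (mask ^^^ (mask ^^^ (mask &&& (mask - 1))))
          (mask ^^^ (mask ^^^ (mask &&& (mask - 1)))) none memo hinv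
        constructor
        · show ((pvBestGo c memo mask t _ _ _ none).1).getD 0 = _
          rw [hgo1, pvBB, if_neg ht1]
          rfl
        · intro m' t' v' hget
          rw [PySem.Dict.get?_insert] at hget
          split at hget
          · rename_i heq
            have hm' : m' = mask := (Prod.ext_iff.mp heq).1
            have ht' : t' = t := (Prod.ext_iff.mp heq).2
            have hv' : v' = ((pvBestGo c memo mask t (mask ^^^ (mask &&& (mask - 1)))
                (mask ^^^ (mask ^^^ (mask &&& (mask - 1))))
                (mask ^^^ (mask ^^^ (mask &&& (mask - 1)))) none).1).getD 0 :=
              (Option.some.inj hget).symm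
            rw [hm', ht', hv', hgo1, pvBB, if_neg ht1]
            rfl
          · exact hgo2 m' t' v' hget

-- ---- bridging A's list program to the model ----
theorem pv_getD_set_self {l : List Int} {i : Nat} {v : Int} (h : i < l.length) :
    (l.set i v).getD i 0 = v := by
  simp [List.getD_eq_getElem?_getD, List.getElem?_set, h]

theorem pv_getD_set_ne {l : List Int} {i x : Nat} {v : Int} (h : i ≠ x) :
    (l.set i v).getD x 0 = l.getD x 0 := by
  simp [List.getD_eq_getElem?_getD, List.getElem?_set, h]

theorem pv_set_self (f : List Int) (j : Nat) : f.set j (f.getD j 0) = f := by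
  apply List.ext_getElem?
  intro i
  rw [List.getElem?_set]
  split
  · rename_i h
    subst h
    split
    · rename_i hlen
      rw [List.getD_eq_getElem?_getD, List.getElem?_eq_getElem hlen]
      rfl
    · rename_i hlen
      exact (List.getElem?_eq_none (by omega)).symm
  · rfl

theorem pvInnerA_unfold (ss : List Int) (j : Nat) (f : List Int) (s : Nat) (h : s ≠ 0) :
    pvInnerA ss j f s =
      pvInnerA ss j (f.set j (min (f.getD j 0) (max (f.getD (j ^^^ s) 0) (ss.getD s 0))))
        ((s - 1) &&& j) := by
  rw [pvInnerA]
  rw [dif_neg h]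
  dsimp only
  have hset : (if (if ss.getD s 0 > f.getD (j ^^^ s) 0 then ss.getD s 0 else f.getD (j ^^^ s) 0)
        < f.getD j 0
       then f.set j (if ss.getD s 0 > f.getD (j ^^^ s) 0 then ss.getD s 0 else f.getD (j ^^^ s) 0)
       else f)
      = f.set j (min (f.getD j 0) (max (f.getD (j ^^^ s) 0) (ss.getD s 0))) := by
    split_ifs with h1 h2 h3
    · congr 1
      rw [max_def, min_def]
      split_ifs <;> omega
    · have hmin : min (f.getD j 0) (max (f.getD (j ^^^ s) 0) (ss.getD s 0)) = f.getD j 0 := by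
        rw [max_def, min_def]
        split_ifs <;> omega
      rw [hmin, pv_set_self]
    · congr 1
      rw [max_def, min_def]
      split_ifs <;> omega
    · have hmin : min (f.getD j 0) (max (f.getD (j ^^^ s) 0) (ss.getD s 0)) = f.getD j 0 := by
        rw [max_def, min_def]
        split_ifs <;> omega
      rw [hmin, pv_set_self]
  rw [hset]

theorem pvInnerA_eq (ss : List Int) (j : Nat) :
    ∀ s f, (pvInnerA ss j f s).length = f.length ∧
      (∀ x, x ≠ j → (pvInnerA ss j f s).getD x 0 = f.getD x 0) ∧
      (j < f.length →
        (pvInnerA ss j f s).getD j 0 =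
          pvVF (fun y => ss.getD y 0) (fun y => f.getD y 0) j s (f.getD j 0)) := by
  intro s
  induction s using Nat.strong_induction_on with
  | _ s IH =>
    intro f
    by_cases h0 : s = 0
    · subst h0
      have he : pvInnerA ss j f 0 = f := by rw [pvInnerA]; simp
      rw [he]
      exact ⟨rfl, fun x _ => rfl, fun _ => by rw [pvVF_zero]⟩
    · rw [pvInnerA_unfold ss j f s h0]
      obtain ⟨ih1, ih2, ih3⟩ := IH _ (pv_nxt_lt j h0)
        (f.set j (min (f.getD j 0) (max (f.getD (j ^^^ s) 0) (ss.getD s 0))))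
      have hglen : (f.set j (min (f.getD j 0) (max (f.getD (j ^^^ s) 0) (ss.getD s 0)))).length
          = f.length := by simp
      have hgne : ∀ x, x ≠ j →
          (f.set j (min (f.getD j 0) (max (f.getD (j ^^^ s) 0) (ss.getD s 0)))).getD x 0
            = f.getD x 0 := by
        intro x hx
        exact pv_getD_set_ne (fun hc => hx hc.symm)
      refine ⟨by rw [ih1, hglen], fun x hx => by rw [ih2 x hx, hgne x hx], ?_⟩
      intro hj
      rw [ih3 (by rw [hglen]; exact hj)]
      have hgj : (f.set j (min (f.getD j 0) (max (f.getD (j ^^^ s) 0) (ss.getD s 0)))).getD j 0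
          = min (f.getD j 0) (max (f.getD (j ^^^ s) 0) (ss.getD s 0)) :=
        pv_getD_set_self hj
      rw [hgj]
      conv_rhs => rw [pvVF_unfold _ _ _ _ _ h0]
      exact pvVF_congr_ne hgne _ _

theorem pvPassA_eq (c : List Int) (ss : List Int) (L : Nat) (t : Nat)
    (hss : ∀ x, x < L → ss.getD x 0 = pvSub c x) :
    ∀ j₀ f, j₀ < L → f.length = L →
      (∀ x, x ≤ j₀ → x < L → f.getD x 0 = pvG (pvSub c) t x) →
      (∀ x, j₀ < x → x < L → f.getD x 0 = pvG (pvSub c) (t + 1) x) →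
      (pvPassA ss f j₀).length = L ∧
      (∀ x, x < L → (pvPassA ss f j₀).getD x 0 = pvG (pvSub c) (t + 1) x) := by
  intro j₀
  induction j₀ with
  | zero =>
    intro f _ hlen hold hnew
    refine ⟨hlen, ?_⟩
    intro x hx
    show f.getD x 0 = _
    cases x with
    | zero => rw [hold 0 le_rfl hx, pvG_succ_zero]
    | succ x' => exact hnew _ (Nat.succ_pos x') hx
  | succ j₀ IH =>
    intro f hjL hlen hold hnew
    show (pvPassA ss (pvInnerA ss (j₀ + 1) f (j₀ + 1)) j₀).length = L ∧ _
    obtain ⟨ih1, ih2, ih3⟩ := pvInnerA_eq ss (j₀ + 1) (j₀ + 1) f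
    have hval : (pvInnerA ss (j₀ + 1) f (j₀ + 1)).getD (j₀ + 1) 0
        = pvG (pvSub c) (t + 1) (j₀ + 1) := by
      rw [ih3 (by omega)]
      show _ = pvVF (pvSub c) (pvG (pvSub c) t) (j₀ + 1) (j₀ + 1) (pvG (pvSub c) t (j₀ + 1))
      rw [hold (j₀ + 1) le_rfl hjL]
      apply pvVF_congr
      · intro x _ hxj
        have hxle : x ≤ j₀ + 1 := pv_submask_le hxj
        exact hss x (by omega)
      · intro x hxj hxne
        have hxle : x ≤ j₀ + 1 := pv_submask_le hxj
        exact hold x (by omega) (by omega)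
      · exact Nat.and_self _
    refine IH (pvInnerA ss (j₀ + 1) f (j₀ + 1)) (by omega) (by rw [ih1, hlen]) ?_ ?_
    · intro x hx hxL
      rw [ih2 x (by omega)]
      exact hold x (by omega) hxL
    · intro x hx hxL
      rcases eq_or_lt_of_le (Nat.succ_le_of_lt hx) with heq | hlt
      · subst heq
        exact hval
      · rw [ih2 x (by omega)]
        exact hnew x (by omega) hxL

theorem pv_iter (c : List Int) (ss : List Int) (L : Nat) (hL : 0 < L)
    (hss : ∀ x, x < L → ss.getD x 0 = pvSub c x) :
    ∀ N (f : List Int), f.length = L →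
      (∀ x, x < L → f.getD x 0 = pvSub c x) →
      ((List.range N).foldl (fun f _ => pvPassA ss f (L - 1)) f).length = L ∧
      ∀ x, x < L →
        ((List.range N).foldl (fun f _ => pvPassA ss f (L - 1)) f).getD x 0
          = pvG (pvSub c) N x := by
  intro N
  induction N with
  | zero =>
    intro f hlen hf
    exact ⟨by simpa using hlen, by simpa using hf⟩
  | succ N IHN =>
    intro f hlen hf
    rw [List.range_succ, List.foldl_append]
    obtain ⟨h1, h2⟩ := IHN f hlen hf
    simp only [List.foldl_cons, List.foldl_nil]
    exact pvPassA_eq c ss L N hss (L - 1) _ (by omega) h1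
      (fun x hx hxL => h2 x hxL) (fun x hx hxL => by omega)

theorem pv_two_pow_disj {i j : Nat} (h : j < 2 ^ i) : 2 ^ i &&& j = 0 := by
  apply Nat.eq_of_testBit_eq; intro b
  simp only [Nat.testBit_and, Nat.zero_testBit, Nat.testBit_two_pow]
  by_cases hb : i = b
  · subst hb
    simp [Nat.testBit_lt_two_pow h]
  · simp [hb]

theorem pv_fold_set (v : Int) (i : Nat) :
    ∀ (l : List Nat) (ss : List Int), (∀ j ∈ l, j < 2 ^ i) → 2 * 2 ^ i ≤ ss.length →
      ((l.foldl (fun ss j => ss.set (2 ^ i ||| j) (ss.getD j 0 + v)) ss).length = ss.length ∧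
       ∀ x, (l.foldl (fun ss j => ss.set (2 ^ i ||| j) (ss.getD j 0 + v)) ss).getD x 0 =
         if 2 ^ i ≤ x ∧ x - 2 ^ i ∈ l then ss.getD (x - 2 ^ i) 0 + v else ss.getD x 0) := by
  intro l
  induction l with
  | nil => intro ss _ _; simp
  | cons j l' IH =>
    intro ss hl hlen
    have hj : j < 2 ^ i := hl j (by simp)
    have hor : 2 ^ i ||| j = 2 ^ i + j := pv_or_add (pv_two_pow_disj hj)
    rw [List.foldl_cons, hor]
    obtain ⟨ih1, ih2⟩ := IH (ss.set (2 ^ i + j) (ss.getD j 0 + v))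
      (fun q hq => hl q (by simp [hq])) (by simpa using hlen)
    refine ⟨by rw [ih1]; simp, ?_⟩
    intro x
    rw [ih2 x]
    by_cases hxl : 2 ^ i ≤ x ∧ x - 2 ^ i ∈ l'
    · rw [if_pos hxl]
      have hxlt : x - 2 ^ i < 2 ^ i := hl _ (by simp [hxl.2])
      rw [if_pos ⟨hxl.1, by simp [hxl.2]⟩]
      rw [pv_getD_set_ne (show 2 ^ i + j ≠ x - 2 ^ i by omega)]
    · rw [if_neg hxl]
      by_cases hx : x = 2 ^ i + j
      · subst hx
        rw [pv_getD_set_self (by omega)]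
        have hc : 2 ^ i ≤ 2 ^ i + j ∧ (2 ^ i + j) - 2 ^ i ∈ j :: l' := by
          constructor
          · omega
          · have : (2 ^ i + j) - 2 ^ i = j := by omega
            rw [this]; simp
        rw [if_pos hc]
        have hjj : (2 ^ i + j) - 2 ^ i = j := by omega
        rw [hjj]
      · rw [pv_getD_set_ne (Ne.symm hx)]
        by_cases hx2 : 2 ^ i ≤ x ∧ x - 2 ^ i ∈ j :: l'
        · rcases hx2 with ⟨hxa, hxb⟩
          simp at hxb
          rcases hxb with hxb | hxb
          · exact absurd (by omega : x = 2 ^ i + j) hx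
          · exact absurd ⟨hxa, hxb⟩ hxl
        · rw [if_neg hx2]

theorem pvBuildSS_spec (c : List Int) :
    (pvBuildSS c).length = 2 ^ c.length ∧
    ∀ x, x < 2 ^ c.length → (pvBuildSS c).getD x 0 = pvSub c x := by
  have main : ∀ (r : List Int) (i : Nat) (ss : List Int),
      i + r.length = c.length → c.drop i = r → ss.length = 2 ^ c.length →
      (∀ x, x < 2 ^ i → ss.getD x 0 = pvSub c x) →
      (∀ x, x < 2 ^ c.length → ¬ x < 2 ^ i → ss.getD x 0 = 0) →
      ((r.zipIdx i).foldl
        (fun ss vi =>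
          let bit := 1 <<< vi.2
          (List.range bit).foldl (fun ss j => ss.set (bit ||| j) (ss.getD j 0 + vi.1)) ss)
        ss).length = 2 ^ c.length ∧
      ∀ x, x < 2 ^ c.length →
        ((r.zipIdx i).foldl
          (fun ss vi =>
            let bit := 1 <<< vi.2
            (List.range bit).foldl (fun ss j => ss.set (bit ||| j) (ss.getD j 0 + vi.1)) ss)
          ss).getD x 0 = pvSub c x := by
    intro r
    induction r with
    | nil =>
      intro i ss hi hdrop hlen hfill _hzero
      simp only [List.zipIdx_nil, List.foldl_nil]
      refine ⟨hlen, ?_⟩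
      intro x hx
      apply hfill
      simp only [List.length_nil, Nat.add_zero] at hi
      rw [hi]
      exact hx
    | cons v r' IH =>
      intro i ss hi hdrop hlen hfill hzero
      rw [List.zipIdx_cons, List.foldl_cons]
      have hiL : i < c.length := by simp only [List.length_cons] at hi; omega
      have hv : c.getD i 0 = v := by
        have h0 : (c.drop i)[0]? = some v := by rw [hdrop]; rfl
        rw [List.getElem?_drop, Nat.add_zero] at h0
        rw [List.getD_eq_getElem?_getD, h0]
        rfl
      have hdrop' : c.drop (i + 1) = r' := by
        have := List.drop_drop (i := 1) (j := i) (l := c)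
        rw [← this, hdrop]
        rfl
      have hsl : (1 : Nat) <<< i = 2 ^ i := by
        rw [Nat.shiftLeft_eq, one_mul]
      have h2i : 2 * 2 ^ i ≤ ss.length := by
        rw [hlen]
        calc 2 * 2 ^ i = 2 ^ (i + 1) := by ring
          _ ≤ 2 ^ c.length := Nat.pow_le_pow_right (by omega) (by omega)
      obtain ⟨f1, f2⟩ := pv_fold_set v i (List.range (2 ^ i)) ss
        (fun j hj => List.mem_range.mp hj) h2i
      simp only [hsl]
      refine IH (i + 1) _ (by simp only [List.length_cons] at hi; omega) hdrop' (by rw [f1, hlen]) ?_ ?_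
      · intro x hx
        rw [f2 x]
        by_cases hxlow : x < 2 ^ i
        · rw [if_neg (by intro hcc; omega)]
          exact hfill x hxlow
        · have hxb : 2 ^ i ≤ x := by omega
          have hxr : x - 2 ^ i < 2 ^ i := by
            have : (2:Nat) ^ (i + 1) = 2 ^ i + 2 ^ i := by ring
            omega
          rw [if_pos ⟨hxb, List.mem_range.mpr hxr⟩]
          rw [hfill _ hxr, ← hv]
          have hxor : (2 : Nat) ^ i ||| (x - 2 ^ i) = x := by
            rw [pv_or_add (pv_two_pow_disj hxr)]
            omega
          conv_rhs => rw [← hxor, pv_sub_add (pv_two_pow_disj hxr), pv_sub_two_pow]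
          ring
      · intro x hx hxn
        rw [f2 x]
        have : ¬ (x - 2 ^ i < 2 ^ i) := by
          have : (2:Nat) ^ (i + 1) = 2 ^ i + 2 ^ i := by ring
          omega
        rw [if_neg (by intro hcc; exact this (List.mem_range.mp hcc.2))]
        apply hzero x hx
        intro hcc
        have h11 : (2:Nat) ^ i ≤ 2 ^ (i + 1) := Nat.pow_le_pow_right (by omega) (by omega)
        omega
  have hrepl : (List.replicate (1 <<< c.length) (0 : Int)).length = 2 ^ c.length := by
    simp [Nat.shiftLeft_eq]
  obtain ⟨m1, m2⟩ := main c 0 (List.replicate (1 <<< c.length) 0) (by omega) rfl hrepl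
    (fun x hx => by
      have hx0 : x = 0 := by simpa using hx
      subst hx0
      rw [pv_sub_zero, List.getD_replicate]
      rw [Nat.shiftLeft_eq, one_mul]
      positivity)
    (fun x hx _ => List.getD_replicate 0 (by rw [Nat.shiftLeft_eq, one_mul]; exact hx))
  exact ⟨m1, m2⟩

theorem pv_last (f : List Int) :
    (PySem.List.pyGet? f (-1)).getD 0 = f.getD (f.length - 1) 0 := by
  rw [PySem.List.pyGet?_neg_one, List.getLast?_eq_getElem?, List.getD_eq_getElem?_getD]

theorem pvA_eq_G (c : List Int) (k : Int) :
    distributeCookies2 c k = pvG (pvSub c) (k - 1).toNat (2 ^ c.length - 1) := by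
  obtain ⟨hb1, hb2⟩ := pvBuildSS_spec c
  have hpos : 0 < 2 ^ c.length := by positivity
  have hsl : (1 : Nat) <<< c.length = 2 ^ c.length := by
    rw [Nat.shiftLeft_eq, one_mul]
  obtain ⟨hi1, hi2⟩ := pv_iter c (pvBuildSS c) (2 ^ c.length) hpos
    (fun x hx => hb2 x hx) (k - 1).toNat (pvBuildSS c) hb1 (fun x hx => hb2 x hx)
  show (PySem.List.pyGet? _ (-1)).getD 0 = _
  rw [hsl]
  rw [pv_last]
  rw [hi1]
  exact hi2 (2 ^ c.length - 1) (by omega)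

-- ===== VERDICT (by name: the statement is the Claim_ definition above) =====
theorem distributeCookies2_spec : Claim_equal_distributeCookies2 := by
  intro c k _dom hpre
  unfold Spec_distributeCookies2
  have hsl : (1 : Nat) <<< c.length = 2 ^ c.length := by
    rw [Nat.shiftLeft_eq, one_mul]
  by_cases hc : c = []
  · subst hc
    rw [pvA_eq_G, distributeCookies2_alt, if_pos rfl]
    simp only [List.length_nil, pow_zero]
    exact pvG_zero _ (pv_sub_zero []) _
  · have hk : 1 ≤ k := hpre.resolve_right hc
    have hlen1 : 1 ≤ c.length := by
      cases c with
      | nil => exact absurd rfl hc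
      | cons a l => simp
    have hfull : (2 : Nat) ^ c.length - 1 ≠ 0 := by
      have h1 : (2:Nat) ^ 1 ≤ 2 ^ c.length := Nat.pow_le_pow_right (by omega) hlen1
      simp at h1
      omega
    have hA : IsLeast (pvSS c ((k - 1).toNat + 1) (2 ^ c.length - 1))
        (pvG (pvSub c) (k - 1).toNat (2 ^ c.length - 1)) := pvG_isLeast c _ _ hfull
    have hB : IsLeast (pvSS c k.toNat (2 ^ c.length - 1))
        (pvBB c (2 ^ c.length - 1) k) := pvBB_isLeast c _ hfull k hk
    have hkk : (k - 1).toNat + 1 = k.toNat := by omega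
    rw [hkk] at hA
    have hmemo : pvInv c PySem.Dict.empty := by
      intro m t v hv
      rw [PySem.Dict.get?_empty] at hv
      cases hv
    have halt : distributeCookies2_alt c k = pvBB c (2 ^ c.length - 1) k := by
      rw [distributeCookies2_alt, if_neg hc, hsl]
      exact (pvBestB_eq c (2 ^ c.length - 1) k PySem.Dict.empty hmemo).1
    rw [pvA_eq_G, halt]
    exact hA.unique hB
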